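-- pv_equiv track=rewrite | github.com/elfisworking/PY_Leet | leetcode_python/lcp39.py | minimumSwitchingTimes
-- ===== SOURCE A (Python) =====
-- from typing import List
-- from collections import defaultdict
--
-- def minimumSwitchingTimes(source: List[List[int]], target: List[List[int]]) -> int:
--     n, m = len(source), len(source[0])
--     d = defaultdict(int)
--     for i in range(n):
--         for j in range(m):
--             d[source[i][j]] += 1
--
--     for i in range(n):
--         for j in range(m):
--             if target[i][j] in d and d[target[i][j]] > 0:
--                 d[target[i][j]] -= 1
--     return sum(d.values())
-- ===== SOURCE B (Python) =====
-- from typing import List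
--
-- def minimumSwitchingTimes(source: List[List[int]], target: List[List[int]]) -> int:
--     n, m = len(source), len(source[0])
--     s = sorted(source[i][j] for i in range(n) for j in range(m))
--     t = sorted(target[i][j] for i in range(n) for j in range(m))
--     matched = 0
--     i = j = 0
--     while i < len(s) and j < len(t):
--         if s[i] == t[j]:
--             matched += 1
--             i += 1
--             j += 1
--         elif s[i] < t[j]:
--             i += 1
--         else:
--             j += 1
--     return n * m - matched
-- ===== Notes on version B (the rewrite author's own statement) =====
-- stated objective: alternative
-- what changed: Replaces A's hash-counter with conditional decrements by a sort-then-merge algorithm: both grids are flattened (over source's index ranges), sorted, and a two-pointer merge counts the matched multiset elements; the answer is n*m minus that matched count, with no dictionary at all.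
import Mathlib
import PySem

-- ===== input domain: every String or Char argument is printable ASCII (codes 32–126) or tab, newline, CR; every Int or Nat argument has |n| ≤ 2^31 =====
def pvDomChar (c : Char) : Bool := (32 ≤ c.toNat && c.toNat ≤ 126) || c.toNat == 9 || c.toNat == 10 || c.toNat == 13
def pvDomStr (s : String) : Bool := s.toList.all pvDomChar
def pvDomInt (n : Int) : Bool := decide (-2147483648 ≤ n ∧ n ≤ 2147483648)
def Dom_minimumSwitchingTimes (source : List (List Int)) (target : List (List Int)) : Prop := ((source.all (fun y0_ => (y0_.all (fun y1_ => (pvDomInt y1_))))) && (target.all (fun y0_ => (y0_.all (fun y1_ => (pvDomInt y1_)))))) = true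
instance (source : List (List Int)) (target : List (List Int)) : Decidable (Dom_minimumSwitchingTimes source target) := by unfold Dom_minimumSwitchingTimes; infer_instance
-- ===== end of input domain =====

-- B replaces A's hash-counter with conditional decrements by sort-then-merge:
-- flatten both grids, sort, count matched elements with a two-pointer merge,
-- return n*m - matched (alternative algorithm; return value only, no mutation).

-- ===== PORT A =====
def minimumSwitchingTimes (source : List (List Int)) (target : List (List Int)) : Int :=
  let n : Int := source.length
  let m : Int := (PySem.List.pyGetD source 0 []).length  -- len(source[0]); Pre_ requires source ≠ []
  let d : PySem.Dict Int Int :=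
    (PySem.List.pyRange 0 n 1).foldl (fun d i =>
      (PySem.List.pyRange 0 m 1).foldl (fun d j =>
        d.modify (PySem.List.pyGetD (PySem.List.pyGetD source i []) j 0) 0 (· + 1)) d)
      PySem.Dict.empty
  let d2 : PySem.Dict Int Int :=
    (PySem.List.pyRange 0 n 1).foldl (fun d i =>
      (PySem.List.pyRange 0 m 1).foldl (fun d j =>
        let v := PySem.List.pyGetD (PySem.List.pyGetD target i []) j 0
        if d.contains v ∧ d.getD v 0 > 0 then d.modify v 0 (· - 1) else d) d)
      d
  d2.values.sum

-- ===== PORT B =====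
-- the two-pointer while loop of Source B, as the obvious recursion over the two lists
-- (i advances = drop the head of s, j advances = drop the head of t)
def pvMergeMatch : List Int → List Int → Int
  | [], _ => 0
  | _ :: _, [] => 0
  | a :: as, b :: bs =>
    if a = b then 1 + pvMergeMatch as bs
    else if a < b then pvMergeMatch as (b :: bs)
    else pvMergeMatch (a :: as) bs
termination_by s t => s.length + t.length

def minimumSwitchingTimes_alt (source : List (List Int)) (target : List (List Int)) : Int :=
  let n : Int := source.length
  let m : Int := (PySem.List.pyGetD source 0 []).length
  let s := PySem.List.sorted
    ((PySem.List.pyRange 0 n 1).flatMap (fun i =>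
      (PySem.List.pyRange 0 m 1).map (fun j =>
        PySem.List.pyGetD (PySem.List.pyGetD source i []) j 0))) (fun x => x) false
  let t := PySem.List.sorted
    ((PySem.List.pyRange 0 n 1).flatMap (fun i =>
      (PySem.List.pyRange 0 m 1).map (fun j =>
        PySem.List.pyGetD (PySem.List.pyGetD target i []) j 0))) (fun x => x) false
  n * m - pvMergeMatch s t

-- ===== PRECONDITION & SPEC =====
-- Pre_ excludes exactly the inputs where Python A raises IndexError: empty source,
-- a source row shorter than source[0], or (when source[0] is nonempty, so target cells
-- are actually read) target lacking an i,j with i < n, j < m.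
def Pre_minimumSwitchingTimes (source : List (List Int)) (target : List (List Int)) : Prop :=
  source ≠ [] ∧
  (∀ row ∈ source, (source.headD []).length ≤ row.length) ∧
  ((source.headD []).length = 0 ∨
    (source.length ≤ target.length ∧
     (∀ row ∈ target.take source.length, (source.headD []).length ≤ row.length)))
instance (source : List (List Int)) (target : List (List Int)) : Decidable (Pre_minimumSwitchingTimes source target) := by unfold Pre_minimumSwitchingTimes; infer_instance
def pvWitness_minimumSwitchingTimes : List (List Int) × List (List Int) := ([[1, 2], [3, 4]], [[2, 1], [5, 5]])
def Spec_minimumSwitchingTimes (source : List (List Int)) (target : List (List Int)) (out : Int) : Prop := out = minimumSwitchingTimes_alt source target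
instance (source : List (List Int)) (target : List (List Int)) (out : Int) : Decidable (Spec_minimumSwitchingTimes source target out) := by unfold Spec_minimumSwitchingTimes; infer_instance

-- ===== CLAIM (what is proved, stated in full; the proofs are below) =====
def Claim_equal_minimumSwitchingTimes : Prop := ∀ (source : List (List Int)) (target : List (List Int)), Dom_minimumSwitchingTimes source target → Pre_minimumSwitchingTimes source target → Spec_minimumSwitchingTimes source target (minimumSwitchingTimes source target)

-- ===== LEMMAS AND PROOFS =====

-- A's conditional-decrement step on the shared counter, as a named function
def decStep (d : PySem.Dict Int Int) (v : Int) : PySem.Dict Int Int :=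
  if d.contains v ∧ d.getD v 0 > 0 then d.modify v 0 (· - 1) else d

lemma nested_foldl {α β γ : Type} (outer : List α) (inner : α → List β) (f : γ → β → γ) (init : γ) :
    outer.foldl (fun d i => (inner i).foldl f d) init = (outer.flatMap inner).foldl f init := by
  induction outer generalizing init with
  | nil => rfl
  | cons a l ih => simp only [List.flatMap_cons, List.foldl_append, List.foldl_cons, ih]

lemma contains_of_getD_pos (d : PySem.Dict Int Int) (v : Int) (h : d.getD v 0 > 0) :
    d.contains v = true := by
  by_contra hc
  rw [PySem.Dict.getD_of_not_contains d 0 (by simpa using hc)] at h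
  omega

lemma keys_decStep (d : PySem.Dict Int Int) (v : Int) : (decStep d v).keys = d.keys := by
  unfold decStep
  split_ifs with h
  · rw [PySem.Dict.keys_modify, PySem.Dict.keys_insert_of_contains _ _ h.1]
  · rfl

lemma getD_decStep (d : PySem.Dict Int Int) (v w : Int) :
    (decStep d v).getD w 0 = if w = v ∧ d.getD v 0 > 0 then d.getD v 0 - 1 else d.getD w 0 := by
  unfold decStep
  split_ifs with h h2 h2
  · rw [h2.1, PySem.Dict.getD_modify_self]
  · rw [PySem.Dict.getD_modify]
    simp only [ite_eq_right_iff]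
    intro hw; exact absurd ⟨hw, h.2⟩ h2
  · exact absurd ⟨contains_of_getD_pos d v h2.2, h2.2⟩ h
  · rfl

lemma phase2_getD (T : List Int) : ∀ (d : PySem.Dict Int Int) (v : Int),
    (T.foldl decStep d).getD v 0 =
      if d.getD v 0 > 0 then max (d.getD v 0 - T.count v) 0 else d.getD v 0 := by
  induction T with
  | nil =>
    intro d v
    simp only [List.foldl_nil, List.count_nil, Nat.cast_zero]
    split_ifs <;> omega
  | cons t rest ih =>
    intro d v
    rw [List.foldl_cons, ih, getD_decStep, List.count_cons]
    by_cases hv : v = t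
    · subst hv
      simp only [true_and, BEq.rfl, if_true]
      split_ifs <;> push_cast <;> omega
    · have hne : (t == v) = false := by simp [Ne.symm hv]
      simp only [hv, false_and, if_false, hne, Bool.false_eq_true]
      split_ifs <;> push_cast <;> omega

lemma phase2_keys (T : List Int) : ∀ (d : PySem.Dict Int Int),
    (T.foldl decStep d).keys = d.keys := by
  induction T with
  | nil => intro d; rfl
  | cons t rest ih => intro d; rw [List.foldl_cons, ih, keys_decStep]

lemma phaseA1_eq (source : List (List Int)) (n m : Int) :
    (PySem.List.pyRange 0 n 1).foldl (fun d i =>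
        (PySem.List.pyRange 0 m 1).foldl (fun d j =>
          d.modify (PySem.List.pyGetD (PySem.List.pyGetD source i []) j 0) 0 (· + 1)) d)
      PySem.Dict.empty
    = PySem.Dict.counter ((PySem.List.pyRange 0 n 1).flatMap (fun i =>
        (PySem.List.pyRange 0 m 1).map (fun j =>
          PySem.List.pyGetD (PySem.List.pyGetD source i []) j 0))) := by
  rw [PySem.Dict.counter_eq_foldl, ← nested_foldl]
  simp only [List.foldl_map]

lemma phaseA2_eq (target : List (List Int)) (n m : Int) (d0 : PySem.Dict Int Int) :
    (PySem.List.pyRange 0 n 1).foldl (fun d i =>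
        (PySem.List.pyRange 0 m 1).foldl (fun d j =>
          if d.contains (PySem.List.pyGetD (PySem.List.pyGetD target i []) j 0) ∧
              d.getD (PySem.List.pyGetD (PySem.List.pyGetD target i []) j 0) 0 > 0 then
            d.modify (PySem.List.pyGetD (PySem.List.pyGetD target i []) j 0) 0 (· - 1)
          else d) d) d0
    = ((PySem.List.pyRange 0 n 1).flatMap (fun i =>
        (PySem.List.pyRange 0 m 1).map (fun j =>
          PySem.List.pyGetD (PySem.List.pyGetD target i []) j 0))).foldl decStep d0 := by
  rw [← nested_foldl]
  simp only [List.foldl_map]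
  rfl

-- B's merge on two sorted lists counts the multiset intersection
lemma mergeMatch_inter (s t : List Int) (hs : s.Pairwise (· ≤ ·)) (ht : t.Pairwise (· ≤ ·)) :
    pvMergeMatch s t = ((Multiset.card ((s : Multiset Int) ∩ (t : Multiset Int))) : Int) := by
  induction s, t using pvMergeMatch.induct with
  | case1 t => simp [pvMergeMatch]
  | case2 a as => simp [pvMergeMatch]
  | case3 as b bs ih =>
    have hcons : ((b :: as : List Int) : Multiset Int) ∩ ((b :: bs : List Int) : Multiset Int)
        = b ::ₘ (((as : List Int) : Multiset Int) ∩ ((bs : List Int) : Multiset Int)) := by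
      ext x
      simp only [← Multiset.cons_coe, Multiset.count_inter, Multiset.count_cons]
      split_ifs <;> omega
    rw [pvMergeMatch, if_pos rfl, hcons, Multiset.card_cons,
      ih (List.Pairwise.of_cons hs) (List.Pairwise.of_cons ht)]
    push_cast; ring
  | case4 a as b bs hne hlt ih =>
    have hnotmem : a ∉ (b :: bs) := by
      simp only [List.mem_cons]
      rintro (rfl | hmem)
      · omega
      · have := (List.pairwise_cons.mp ht).1 a hmem; omega
    have hdrop : ((a :: as : List Int) : Multiset Int) ∩ ((b :: bs : List Int) : Multiset Int)
        = ((as : List Int) : Multiset Int) ∩ ((b :: bs : List Int) : Multiset Int) := by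
      ext x
      rw [Multiset.count_inter, Multiset.count_inter]
      by_cases hx : x = a
      · have hc0 : Multiset.count x ((b :: bs : List Int) : Multiset Int) = 0 := by
          rw [Multiset.coe_count, hx]; exact List.count_eq_zero.mpr hnotmem
        rw [hc0]; simp
      · have hxc : Multiset.count x ((a :: as : List Int) : Multiset Int)
            = Multiset.count x ((as : List Int) : Multiset Int) := by
          simp [Multiset.coe_count, Ne.symm hx]
        rw [hxc]
    rw [pvMergeMatch, if_neg hne, if_pos hlt, hdrop,
      ih (List.Pairwise.of_cons hs) ht]
  | case5 a as b bs hne hge ih =>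
    have hnotmem : b ∉ (a :: as) := by
      simp only [List.mem_cons]
      rintro (rfl | hmem)
      · omega
      · have := (List.pairwise_cons.mp hs).1 b hmem; omega
    have hdrop : ((a :: as : List Int) : Multiset Int) ∩ ((b :: bs : List Int) : Multiset Int)
        = ((a :: as : List Int) : Multiset Int) ∩ ((bs : List Int) : Multiset Int) := by
      ext x
      rw [Multiset.count_inter, Multiset.count_inter]
      by_cases hx : x = b
      · have hc0 : Multiset.count x ((a :: as : List Int) : Multiset Int) = 0 := by
          rw [Multiset.coe_count, hx]; exact List.count_eq_zero.mpr hnotmem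
        rw [hc0]; simp
      · have hxc : Multiset.count x ((b :: bs : List Int) : Multiset Int)
            = Multiset.count x ((bs : List Int) : Multiset Int) := by
          simp [Multiset.coe_count, Ne.symm hx]
        rw [hxc]
    rw [pvMergeMatch, if_neg hne, if_neg hge, hdrop,
      ih hs (List.Pairwise.of_cons ht)]

-- A's final sum equals |S| minus the multiset-intersection cardinality
lemma sum_values_eq (S T : List Int) :
    (T.foldl decStep (PySem.Dict.counter S)).values.sum
    = (S.length : Int) - ((Multiset.card ((S : Multiset Int) ∩ (T : Multiset Int))) : Int) := by
  have hkeys : (T.foldl decStep (PySem.Dict.counter S)).keys = PySem.Set.ofList S := by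
    rw [phase2_keys, PySem.Dict.keys_counter]
  have hnodup : (T.foldl decStep (PySem.Dict.counter S)).keys.Nodup := by
    rw [phase2_keys]; exact PySem.Dict.nodup_keys_counter S
  rw [PySem.Dict.values_eq_map_keys _ hnodup 0, hkeys]
  have hmap : (PySem.Set.ofList S).map
      (fun k => (T.foldl decStep (PySem.Dict.counter S)).getD k 0)
      = (PySem.Set.ofList S).map
        (fun k => max ((S.count k : Int) - (T.count k : Int)) 0) := by
    apply List.map_congr_left
    intro k hk
    have hmem : k ∈ S := (PySem.Set.mem_ofList S k).1 hk
    have hcnt : 0 < S.count k := List.count_pos_iff.2 hmem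
    rw [phase2_getD, PySem.Dict.getD_counter,
      if_pos (show (0:Int) < S.count k by exact_mod_cast hcnt)]
  rw [hmap]
  -- list sum over the distinct keys → Finset sum over S.toFinset
  have hnd : (PySem.Set.ofList S).Nodup := PySem.Set.nodup_ofList S
  have htfs : (PySem.Set.ofList S).toFinset = S.toFinset := by
    apply Finset.ext
    intro x
    simp [List.mem_toFinset, PySem.Set.mem_ofList]
  rw [← List.sum_toFinset _ hnd, htfs]
  have hsplit : ∑ k ∈ S.toFinset, max ((S.count k : Int) - (T.count k : Int)) 0
      = (∑ k ∈ S.toFinset, (S.count k : Int))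
        - ∑ k ∈ S.toFinset, ((min (S.count k) (T.count k) : Nat) : Int) := by
    rw [← Finset.sum_sub_distrib]
    apply Finset.sum_congr rfl
    intro k _
    push_cast
    omega
  rw [hsplit]
  have hlen : ∑ k ∈ S.toFinset, (S.count k : Int) = (S.length : Int) := by
    rw [← Nat.cast_sum]
    exact_mod_cast congrArg (Nat.cast (R := Int)) (List.sum_toFinset_count_eq_length S)
  have hinter : ∑ k ∈ S.toFinset, ((min (S.count k) (T.count k) : Nat) : Int)
      = ((Multiset.card ((S : Multiset Int) ∩ (T : Multiset Int))) : Int) := by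
    rw [← Nat.cast_sum]
    congr 1
    have : ∀ k, min (S.count k) (T.count k)
        = Multiset.count k ((S : Multiset Int) ∩ (T : Multiset Int)) := by
      intro k; rw [Multiset.count_inter]; simp
    simp only [this]
    exact Multiset.sum_count_eq_card (fun a ha => by
      have hpos := Multiset.count_pos.mpr ha
      rw [Multiset.count_inter] at hpos
      have h1 : 0 < Multiset.count a ((S : List Int) : Multiset Int) :=
        lt_of_lt_of_le hpos (min_le_left _ _)
      rw [Multiset.coe_count] at h1
      exact List.mem_toFinset.mpr (List.count_pos_iff.1 h1))
  rw [hlen, hinter]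

-- the flattened index grid has length n*m
lemma flat_length (f : Int → Int → Int) (n m : Int) :
    (((PySem.List.pyRange 0 n 1).flatMap (fun i =>
      (PySem.List.pyRange 0 m 1).map (fun j => f i j))).length : Int) = n.toNat * m.toNat := by
  simp [List.length_flatMap, PySem.List.length_pyRange_one, List.map_const', Nat.cast_mul]

-- ===== VERDICT (by name: the statement is the Claim_ definition above) =====
theorem minimumSwitchingTimes_spec : Claim_equal_minimumSwitchingTimes := by
  intro source target _ _
  unfold Spec_minimumSwitchingTimes minimumSwitchingTimes minimumSwitchingTimes_alt
  simp only []
  rw [phaseA1_eq, phaseA2_eq, sum_values_eq]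
  set S := (PySem.List.pyRange 0 (source.length : Int) 1).flatMap (fun i =>
      (PySem.List.pyRange 0 ((PySem.List.pyGetD source 0 []).length : Int) 1).map (fun j =>
        PySem.List.pyGetD (PySem.List.pyGetD source i []) j 0)) with hS
  set T := (PySem.List.pyRange 0 (source.length : Int) 1).flatMap (fun i =>
      (PySem.List.pyRange 0 ((PySem.List.pyGetD source 0 []).length : Int) 1).map (fun j =>
        PySem.List.pyGetD (PySem.List.pyGetD target i []) j 0)) with hT
  have hms : ((PySem.List.sorted S (fun x => x) false : List Int) : Multiset Int)
      = ((S : List Int) : Multiset Int) :=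
    Multiset.coe_eq_coe.mpr (PySem.List.sorted_perm S (fun x => x) false)
  have hmt : ((PySem.List.sorted T (fun x => x) false : List Int) : Multiset Int)
      = ((T : List Int) : Multiset Int) :=
    Multiset.coe_eq_coe.mpr (PySem.List.sorted_perm T (fun x => x) false)
  rw [mergeMatch_inter _ _ (PySem.List.sorted_pairwise S (fun x => x))
    (PySem.List.sorted_pairwise T (fun x => x)), hms, hmt]
  have hlen : (S.length : Int)
      = (source.length : Int) * ((PySem.List.pyGetD source 0 []).length : Int) := by
    rw [hS, flat_length]
    simp
  rw [hlen]
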